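-- pv_equiv track=rewrite | github.com/jamOne-/adventofcode2018 | 22/22a.py | prepare_cave
-- ===== SOURCE A (Python) =====
-- def prepare_cave(target, depth):
--   cols, rows = target[0] + 1, target[1] + 1
--   cave = [[0] * cols for row in range(rows)]
--
--   for x in range(1, cols):
--     cave[0][x] = (x * 16807 + depth) % 20183
--
--   for y in range(1, rows):
--     cave[y][0] = (y * 48271 + depth) % 20183
--
--   for y in range(1, rows):
--     for x in range(1, cols):
--       cave[y][x] = (cave[y][x - 1] * cave[y - 1][x] + depth) % 20183
--
--   cave[0][0] = depth % 20183
--   cave[target[1]][target[0]] = depth % 20183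
--
--   cave = [list(map(lambda region: region % 3, row)) for row in cave]
--
--   return cave
-- ===== SOURCE B (Python) =====
-- def prepare_cave(target, depth):
--   tx, ty = target
--   cache = {}
--
--   def erosion(x, y):
--     row = cache.get(y)
--     if row is None:
--       row = cache[y] = [None] * (tx + 1)
--     v = row[x]
--     if v is not None:
--       return v
--     if (x == 0 and y == 0) or (x == tx and y == ty):
--       geo = 0
--     elif y == 0:
--       geo = x * 16807
--     elif x == 0:
--       geo = y * 48271
--     else:
--       a = row[x - 1]
--       if a is None:
--         a = erosion(x - 1, y)
--       prev = cache.get(y - 1)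
--       b = prev[x] if prev is not None else None
--       if b is None:
--         b = erosion(x, y - 1)
--       geo = a * b
--     e = (geo + depth) % 20183
--     row[x] = e
--     return e
--
--   grid = []
--   for y in range(ty + 1):
--     grid.append([erosion(x, y) % 3 for x in range(tx + 1)])
--     if y > 0:
--       del cache[y - 1]
--   return grid
-- ===== Notes on version B (the rewrite author's own statement) =====
-- stated objective: alternative
-- what changed: A fills a mutable grid bottom-up in three separate sweeps (top row, left column, interior) and then patches the two corner cells and maps %3 over the whole grid; B is a top-down memoized recursion erosion(x,y) over a dict cache whose geologic-index cases (origin/target = 0, edges, product of neighbour erosions) directly encode each cell's final value, the grid being read off row by row while cache entries the recursion can no longer reach are evicted.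
import Mathlib
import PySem

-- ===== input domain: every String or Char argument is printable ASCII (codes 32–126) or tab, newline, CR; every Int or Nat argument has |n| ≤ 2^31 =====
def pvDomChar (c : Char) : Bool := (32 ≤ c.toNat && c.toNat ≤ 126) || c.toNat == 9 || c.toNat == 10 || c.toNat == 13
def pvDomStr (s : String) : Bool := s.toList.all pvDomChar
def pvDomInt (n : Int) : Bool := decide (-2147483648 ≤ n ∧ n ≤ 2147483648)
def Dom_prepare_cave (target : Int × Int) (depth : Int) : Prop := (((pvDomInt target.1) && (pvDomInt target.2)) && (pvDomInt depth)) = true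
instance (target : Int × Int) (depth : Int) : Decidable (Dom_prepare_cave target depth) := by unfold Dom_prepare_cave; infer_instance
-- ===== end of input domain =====

-- B replaces A's three bottom-up grid sweeps plus corner patches with a top-down memoized
-- recursion erosion(x, y) over a dict cache (objective: alternative algorithmic decomposition).

-- ===== PORT A =====
-- cave[y][x] = v  (indices are nonnegative and in range wherever A executes this, so .toNat/.set are exact there)
def pvSet2 (g : List (List Int)) (y x : Int) (v : Int) : List (List Int) :=
  g.set y.toNat ((g.getD y.toNat []).set x.toNat v)

-- cave[y][x]  (reads in A are always in range under Pre_, so the defaults are never taken)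
def pvGet2 (g : List (List Int)) (y x : Int) : Int :=
  (g.getD y.toNat []).getD x.toNat 0

def prepare_cave (target : Int × Int) (depth : Int) : List (List Int) :=
  let cols := target.1 + 1
  let rows := target.2 + 1
  let cave0 := (PySem.List.pyRange 0 rows 1).map (fun _ => List.replicate cols.toNat (0 : Int))
  let cave1 := (PySem.List.pyRange 1 cols 1).foldl
      (fun c x => pvSet2 c 0 x ((x * 16807 + depth) % 20183)) cave0
  let cave2 := (PySem.List.pyRange 1 rows 1).foldl
      (fun c y => pvSet2 c y 0 ((y * 48271 + depth) % 20183)) cave1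
  let cave3 := (PySem.List.pyRange 1 rows 1).foldl
      (fun c y => (PySem.List.pyRange 1 cols 1).foldl
        (fun c x => pvSet2 c y x ((pvGet2 c y (x - 1) * pvGet2 c (y - 1) x + depth) % 20183)) c) cave2
  let cave4 := pvSet2 cave3 0 0 (depth % 20183)
  let cave5 := pvSet2 cave4 target.2 target.1 (depth % 20183)
  cave5.map (fun row => row.map (fun region => region % 3))

-- ===== PORT B =====
-- erosion(x, y) with a per-row memo (cache : dict y -> row of Optional values); B only calls it
-- with nonnegative range indices, so Nat coordinates are exact for Python's ints, and row reads
-- are in range wherever B executes them (rows always have length tx+1), so getD is exact there.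
-- Python's `row` aliases the list object cache[y]; the port mirrors the final in-place
-- `row[x] = e` by re-fetching the current row at y and writing back the updated row.
def pvErosion (tx ty depth : Int) (cache : PySem.Dict Nat (List (Option Int))) (x y : Nat) :
    Int × PySem.Dict Nat (List (Option Int)) :=
  let rc : List (Option Int) × PySem.Dict Nat (List (Option Int)) :=
    match cache.get? y with
    | some r => (r, cache)
    | none =>
      let r := List.replicate (tx + 1).toNat (none : Option Int)
      (r, cache.insert y r)
  match rc.1.getD x none with
  | some v => (v, rc.2)
  | none =>
    let gc : Int × PySem.Dict Nat (List (Option Int)) :=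
      if (x = 0 ∧ y = 0) ∨ ((x : Int) = tx ∧ (y : Int) = ty) then (0, rc.2)
      else if hy : y = 0 then ((x : Int) * 16807, rc.2)
      else if hx : x = 0 then ((y : Int) * 48271, rc.2)
      else
        let ac : Int × PySem.Dict Nat (List (Option Int)) :=
          match rc.1.getD (x - 1) none with
          | some a => (a, rc.2)
          | none => pvErosion tx ty depth rc.2 (x - 1) y
        let bc : Int × PySem.Dict Nat (List (Option Int)) :=
          match (ac.2.get? (y - 1)).bind (fun prev => prev.getD x none) with
          | some b => (b, ac.2)
          | none => pvErosion tx ty depth ac.2 x (y - 1)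
        (ac.1 * bc.1, bc.2)
    let e := (gc.1 + depth) % 20183
    let rowNow := (gc.2.get? y).getD (List.replicate (tx + 1).toNat none)
    (e, gc.2.insert y (rowNow.set x e))
termination_by x + y
decreasing_by all_goals omega

def prepare_cave_alt (target : Int × Int) (depth : Int) : List (List Int) :=
  let tx := target.1
  let ty := target.2
  ((PySem.List.pyRange 0 (ty + 1) 1).foldl
    (fun (st : List (List Int) × PySem.Dict Nat (List (Option Int))) y =>
      let rc := (PySem.List.pyRange 0 (tx + 1) 1).foldl
        (fun (rc : List Int × PySem.Dict Nat (List (Option Int))) x =>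
          let ec := pvErosion tx ty depth rc.2 x.toNat y.toNat
          (rc.1 ++ [ec.1 % 3], ec.2)) ([], st.2)
      -- del cache[y - 1] ported as Dict.erase: exact here, the key is always present
      let c2 := if 0 < y then rc.2.erase (y - 1).toNat else rc.2
      (st.1 ++ [rc.1], c2)) ([], PySem.Dict.empty)).1

-- ===== PRECONDITION & SPEC =====
-- A indexes cave[0][...] / cave[target[1]][target[0]] unconditionally, so it raises IndexError
-- unless both target coordinates are nonnegative.
def Pre_prepare_cave (target : Int × Int) (depth : Int) : Prop :=
  0 ≤ target.1 ∧ 0 ≤ target.2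
instance (target : Int × Int) (depth : Int) : Decidable (Pre_prepare_cave target depth) := by
  unfold Pre_prepare_cave; infer_instance

def pvWitness_prepare_cave : (Int × Int) × Int := ((2, 3), 510)

def Spec_prepare_cave (target : Int × Int) (depth : Int) (out : List (List Int)) : Prop := out = prepare_cave_alt target depth
instance (target : Int × Int) (depth : Int) (out : List (List Int)) : Decidable (Spec_prepare_cave target depth out) := by unfold Spec_prepare_cave; infer_instance

-- ===== CLAIM (what is proved, stated in full; the proofs are below) =====
def Claim_equal_prepare_cave : Prop := ∀ (target : Int × Int) (depth : Int), Dom_prepare_cave target depth → Pre_prepare_cave target depth → Spec_prepare_cave target depth (prepare_cave target depth)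


-- ===== LEMMAS AND PROOFS =====

-- Final erosion value of cell (x, y) in a cave with target (m, n): geologic index 0 at origin
-- and target, x*16807 on the top row, y*48271 on the left column, product of neighbours inside.
def Efun (m n : Nat) (depth : Int) (x y : Nat) : Int :=
  if (x = 0 ∧ y = 0) ∨ (x = m ∧ y = n) then (0 + depth) % 20183
  else if y = 0 then ((x : Int) * 16807 + depth) % 20183
  else if x = 0 then ((y : Int) * 48271 + depth) % 20183
  else (Efun m n depth (x - 1) y * Efun m n depth x (y - 1) + depth) % 20183
termination_by x + y
decreasing_by all_goals omega

-- Pre-overwrite fill value computed by A's three sweeps ((0,0) still holds its initial 0).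
def Ffun (depth : Int) (x y : Nat) : Int :=
  if y = 0 then (if x = 0 then 0 else ((x : Int) * 16807 + depth) % 20183)
  else if x = 0 then ((y : Int) * 48271 + depth) % 20183
  else (Ffun depth (x - 1) y * Ffun depth x (y - 1) + depth) % 20183
termination_by x + y
decreasing_by all_goals omega

theorem Efun_eq_Ffun_aux (m n : Nat) (depth : Int) :
    ∀ N x y, x + y ≤ N → x ≤ m → y ≤ n → ¬(x = 0 ∧ y = 0) → ¬(x = m ∧ y = n) →
    Efun m n depth x y = Ffun depth x y := by
  intro N
  induction N with
  | zero => intro x y h _ _ h00 _; omega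
  | succ N ih =>
    intro x y h hxm hyn h00 hmn
    rw [Efun, Ffun]
    rw [if_neg (by tauto)]
    by_cases hy : y = 0
    · subst hy
      rw [if_pos rfl, if_pos rfl, if_neg (by omega : ¬ x = 0)]
    · rw [if_neg hy, if_neg hy]
      by_cases hx : x = 0
      · rw [if_pos hx, if_pos hx]
      · rw [if_neg hx, if_neg hx]
        rw [ih (x - 1) y (by omega) (by omega) hyn (by omega) (by omega),
            ih x (y - 1) (by omega) hxm (by omega) (by omega) (by omega)]

theorem Efun_eq_Ffun (m n : Nat) (depth : Int) (x y : Nat)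
    (hxm : x ≤ m) (hyn : y ≤ n) (h00 : ¬(x = 0 ∧ y = 0)) (hmn : ¬(x = m ∧ y = n)) :
    Efun m n depth x y = Ffun depth x y :=
  Efun_eq_Ffun_aux m n depth (x + y) x y le_rfl hxm hyn h00 hmn

def rowlist (m n : Nat) (depth : Int) (y : Nat) : List Int :=
  (List.range (m + 1)).map (fun x => Efun m n depth x y)

def Grid (m n : Nat) (depth : Int) : List (List Int) :=
  (List.range (n + 1)).map (fun y => (rowlist m n depth y).map (fun e => e % 3))

-- ---------- A side ----------

def nGet (g : List (List Int)) (y x : Nat) : Int := (g.getD y []).getD x 0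
def nSet (g : List (List Int)) (y x : Nat) (v : Int) : List (List Int) :=
  g.set y ((g.getD y []).set x v)

theorem pvSet2_cast (g : List (List Int)) (y x : Nat) (v : Int) :
    pvSet2 g (y : Int) (x : Int) v = nSet g y x v := by
  simp [pvSet2, nSet]

theorem pvSet2_cast_y0 (g : List (List Int)) (x : Nat) (v : Int) :
    pvSet2 g 0 (x : Int) v = nSet g 0 x v := by
  simpa using pvSet2_cast g 0 x v

theorem pvSet2_cast_x0 (g : List (List Int)) (y : Nat) (v : Int) :
    pvSet2 g (y : Int) 0 v = nSet g y 0 v := by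
  simpa using pvSet2_cast g y 0 v

theorem pvSet2_cast_00 (g : List (List Int)) (v : Int) :
    pvSet2 g 0 0 v = nSet g 0 0 v := by
  simpa using pvSet2_cast g 0 0 v

theorem pvGet2_cast (g : List (List Int)) (y x : Nat) :
    pvGet2 g (y : Int) (x : Int) = nGet g y x := by
  simp [pvGet2, nGet]

theorem pvGet2_cast_sub (g : List (List Int)) (j x : Nat) (hj : 1 ≤ j) :
    pvGet2 g ((j : Int) - 1) (x : Int) = nGet g (j - 1) x := by
  rw [show ((j : Int) - 1) = ((j - 1 : Nat) : Int) by omega, pvGet2_cast]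

def shape2 (g : List (List Int)) (r c : Nat) : Prop :=
  g.length = r ∧ ∀ row ∈ g, row.length = c

theorem shape2_row (g : List (List Int)) (r c : Nat) (hs : shape2 g r c) (y : Nat)
    (hy : y < r) : (g.getD y []).length = c := by
  obtain ⟨h1, h2⟩ := hs
  rw [List.getD_eq_getElem _ _ (by omega)]
  exact h2 _ (List.getElem_mem (by omega))

theorem shape2_nSet (g : List (List Int)) (r c : Nat) (hs : shape2 g r c)
    (y x : Nat) (v : Int) : shape2 (nSet g y x v) r c := by
  obtain ⟨h1, h2⟩ := hs
  refine ⟨by simp [nSet, h1], ?_⟩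
  intro row hr
  by_cases hy : y < g.length
  · rcases List.mem_or_eq_of_mem_set hr with h | h
    · exact h2 _ h
    · subst h
      rw [List.length_set, List.getD_eq_getElem _ _ hy]
      exact h2 _ (List.getElem_mem hy)
  · rw [nSet, List.set_eq_of_length_le (by omega)] at hr
    exact h2 _ hr

theorem getD_set_eq {α : Type} (l : List α) (i : Nat) (a d : α) (h : i < l.length) :
    (l.set i a).getD i d = a := by
  rw [List.getD_eq_getElem _ _ (by simpa using h)]
  simp

theorem getD_set_ne {α : Type} (l : List α) (i j : Nat) (a d : α) (h : i ≠ j) :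
    (l.set i a).getD j d = l.getD j d := by
  rw [List.getD_eq_getElem?_getD (l := l.set i a), List.getD_eq_getElem?_getD (l := l),
      List.getElem?_set, if_neg h]

theorem nGet_nSet_self (g : List (List Int)) (y x : Nat) (v : Int)
    (hy : y < g.length) (hx : x < (g.getD y []).length) :
    nGet (nSet g y x v) y x = v := by
  unfold nGet nSet
  rw [getD_set_eq _ _ _ _ (by omega), getD_set_eq _ _ _ _ (by omega)]

theorem nGet_nSet_ne (g : List (List Int)) (y x y' x' : Nat) (v : Int)
    (h : y' ≠ y ∨ x' ≠ x) : nGet (nSet g y x v) y' x' = nGet g y' x' := by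
  unfold nGet nSet
  by_cases hyy : y = y'
  · subst hyy
    have hx : x ≠ x' := by tauto
    by_cases hylen : y < g.length
    · rw [getD_set_eq _ _ _ _ (by omega), getD_set_ne _ _ _ _ _ hx]
    · rw [List.set_eq_of_length_le (by omega)]
  · rw [getD_set_ne _ _ _ _ _ hyy]

-- grid state during A's interior sweep: rows < j are fully filled, row j filled through column i
def P3 (depth : Int) (m n j i : Nat) (y x : Nat) : Int :=
  if y = 0 ∧ 1 ≤ x ∧ x ≤ m then Ffun depth x 0
  else if x = 0 ∧ 1 ≤ y ∧ y ≤ n then Ffun depth 0 y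
  else if 1 ≤ y ∧ 1 ≤ x ∧ x ≤ m ∧ y ≤ n ∧ (y < j ∨ (y = j ∧ x ≤ i)) then Ffun depth x y
  else 0

def cave0 (m n : Nat) : List (List Int) :=
  List.replicate (n + 1) (List.replicate (m + 1) (0 : Int))

theorem shape2_cave0 (m n : Nat) : shape2 (cave0 m n) (n + 1) (m + 1) := by
  refine ⟨by simp [cave0], ?_⟩
  intro row hr
  rw [List.eq_of_mem_replicate hr]
  simp

theorem getD_replicate' {α : Type} (k : Nat) (a d : α) (i : Nat) :
    (List.replicate k a).getD i d = if i < k then a else d := by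
  rw [List.getD_eq_getElem?_getD, List.getElem?_replicate]
  split_ifs <;> rfl

theorem nGet_cave0 (m n : Nat) (y x : Nat) : nGet (cave0 m n) y x = 0 := by
  unfold nGet cave0
  rw [getD_replicate']
  split_ifs with h
  · rw [getD_replicate']
    split_ifs <;> rfl
  · rfl

theorem A_phase1 (m n : Nat) (depth : Int) :
    ∀ k, k ≤ m →
      (shape2 (((List.range k).map (fun i : Nat => (1 : Int) + (i : Int))).foldl
          (fun c x => pvSet2 c 0 x ((x * 16807 + depth) % 20183)) (cave0 m n)) (n + 1) (m + 1)) ∧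
      (∀ y x, nGet (((List.range k).map (fun i : Nat => (1 : Int) + (i : Int))).foldl
          (fun c x => pvSet2 c 0 x ((x * 16807 + depth) % 20183)) (cave0 m n)) y x
        = if y = 0 ∧ 1 ≤ x ∧ x ≤ k then Ffun depth x 0 else 0) := by
  intro k
  induction k with
  | zero =>
    intro _
    simp only [List.range_zero, List.map_nil, List.foldl_nil]
    refine ⟨shape2_cave0 m n, ?_⟩
    intro y x
    rw [nGet_cave0]
    split_ifs with h
    · omega
    · rfl
  | succ k ih =>
    intro hk
    obtain ⟨ihs, ihv⟩ := ih (by omega)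
    simp only [List.range_succ, List.map_append, List.foldl_append,
      List.map_cons, List.map_nil, List.foldl_cons, List.foldl_nil]
    rw [show (1 : Int) + (k : Int) = ((k + 1 : Nat) : Int) by push_cast; ring,
        pvSet2_cast_y0]
    refine ⟨shape2_nSet _ _ _ ihs _ _ _, ?_⟩
    intro y x
    by_cases hyx : y = 0 ∧ x = k + 1
    · obtain ⟨hy, hx⟩ := hyx
      subst hy; subst hx
      rw [nGet_nSet_self _ _ _ _ (by rw [ihs.1]; omega)
            (by rw [shape2_row _ _ _ ihs 0 (by omega)]; omega)]
      rw [if_pos ⟨rfl, by omega, le_rfl⟩, Ffun, if_pos rfl,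
          if_neg (by omega : ¬ k + 1 = 0)]
    · rw [nGet_nSet_ne _ _ _ _ _ _ (by omega), ihv]
      split_ifs <;> first | rfl | omega

theorem A_phase2 (m n : Nat) (depth : Int) (c : List (List Int))
    (hs : shape2 c (n + 1) (m + 1))
    (hc : ∀ y x, nGet c y x = if y = 0 ∧ 1 ≤ x ∧ x ≤ m then Ffun depth x 0 else 0) :
    ∀ k, k ≤ n →
      (shape2 (((List.range k).map (fun i : Nat => (1 : Int) + (i : Int))).foldl
          (fun c y => pvSet2 c y 0 ((y * 48271 + depth) % 20183)) c) (n + 1) (m + 1)) ∧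
      (∀ y x, nGet (((List.range k).map (fun i : Nat => (1 : Int) + (i : Int))).foldl
          (fun c y => pvSet2 c y 0 ((y * 48271 + depth) % 20183)) c) y x
        = if y = 0 ∧ 1 ≤ x ∧ x ≤ m then Ffun depth x 0
          else if x = 0 ∧ 1 ≤ y ∧ y ≤ k then Ffun depth 0 y else 0) := by
  intro k
  induction k with
  | zero =>
    intro _
    simp only [List.range_zero, List.map_nil, List.foldl_nil]
    refine ⟨hs, ?_⟩
    intro y x
    rw [hc]
    split_ifs <;> first | rfl | omega
  | succ k ih =>
    intro hk
    obtain ⟨ihs, ihv⟩ := ih (by omega)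
    simp only [List.range_succ, List.map_append, List.foldl_append,
      List.map_cons, List.map_nil, List.foldl_cons, List.foldl_nil]
    rw [show (1 : Int) + (k : Int) = ((k + 1 : Nat) : Int) by push_cast; ring,
        pvSet2_cast_x0]
    refine ⟨shape2_nSet _ _ _ ihs _ _ _, ?_⟩
    intro y x
    by_cases hyx : y = k + 1 ∧ x = 0
    · obtain ⟨hy, hx⟩ := hyx
      subst hy; subst hx
      rw [nGet_nSet_self _ _ _ _ (by rw [ihs.1]; omega)
            (by rw [shape2_row _ _ _ ihs (k + 1) (by omega)]; omega)]
      rw [if_neg (by omega), if_pos ⟨rfl, by omega, le_rfl⟩, Ffun,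
          if_neg (by omega : ¬ k + 1 = 0), if_pos rfl]
    · rw [nGet_nSet_ne _ _ _ _ _ _ (by omega), ihv]
      split_ifs <;> first | rfl | omega

theorem A_phase3_row (m n : Nat) (depth : Int) (j : Nat) (hj1 : 1 ≤ j) (hjn : j ≤ n)
    (c : List (List Int)) (hs : shape2 c (n + 1) (m + 1))
    (hc : ∀ y x, nGet c y x = P3 depth m n j 0 y x) :
    ∀ i, i ≤ m →
      (shape2 (((List.range i).map (fun t : Nat => (1 : Int) + (t : Int))).foldl
          (fun c x => pvSet2 c (j : Int) x
            ((pvGet2 c (j : Int) (x - 1) * pvGet2 c ((j : Int) - 1) x + depth) % 20183)) c)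
        (n + 1) (m + 1)) ∧
      (∀ y x, nGet (((List.range i).map (fun t : Nat => (1 : Int) + (t : Int))).foldl
          (fun c x => pvSet2 c (j : Int) x
            ((pvGet2 c (j : Int) (x - 1) * pvGet2 c ((j : Int) - 1) x + depth) % 20183)) c) y x
        = P3 depth m n j i y x) := by
  intro i
  induction i with
  | zero =>
    intro _
    simp only [List.range_zero, List.map_nil, List.foldl_nil]
    exact ⟨hs, hc⟩
  | succ i ih =>
    intro hi
    obtain ⟨ihs, ihv⟩ := ih (by omega)
    simp only [List.range_succ, List.map_append, List.foldl_append,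
      List.map_cons, List.map_nil, List.foldl_cons, List.foldl_nil]
    rw [show (1 : Int) + (i : Int) = ((i + 1 : Nat) : Int) by push_cast; ring]
    rw [show ((i + 1 : Nat) : Int) - 1 = ((i : Nat) : Int) by push_cast; ring]
    rw [pvGet2_cast _ j i, pvGet2_cast_sub _ j (i + 1) hj1, pvSet2_cast _ j (i + 1)]
    have hg1 : nGet (((List.range i).map (fun t : Nat => (1 : Int) + (t : Int))).foldl
        (fun c x => pvSet2 c (j : Int) x
          ((pvGet2 c (j : Int) (x - 1) * pvGet2 c ((j : Int) - 1) x + depth) % 20183)) c) j i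
        = Ffun depth i j := by
      rw [ihv]
      unfold P3
      by_cases hi0 : i = 0
      · subst hi0
        rw [if_neg (by omega), if_pos ⟨rfl, by omega, by omega⟩]
      · rw [if_neg (by omega), if_neg (by omega),
            if_pos ⟨by omega, by omega, by omega, by omega, Or.inr ⟨rfl, le_rfl⟩⟩]
    have hg2 : nGet (((List.range i).map (fun t : Nat => (1 : Int) + (t : Int))).foldl
        (fun c x => pvSet2 c (j : Int) x
          ((pvGet2 c (j : Int) (x - 1) * pvGet2 c ((j : Int) - 1) x + depth) % 20183)) c) (j - 1) (i + 1)
        = Ffun depth (i + 1) (j - 1) := by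
      rw [ihv]
      unfold P3
      by_cases hj1' : j = 1
      · subst hj1'
        rw [if_pos ⟨by omega, by omega, by omega⟩]
      · rw [if_neg (by omega), if_neg (by omega),
            if_pos ⟨by omega, by omega, by omega, by omega, Or.inl (by omega)⟩]
    rw [hg1, hg2]
    refine ⟨shape2_nSet _ _ _ ihs _ _ _, ?_⟩
    intro y x
    by_cases hyx : y = j ∧ x = i + 1
    · obtain ⟨hy, hx⟩ := hyx
      subst hx
      rw [hy]
      rw [nGet_nSet_self _ _ _ _ (by rw [ihs.1]; omega)
            (by rw [shape2_row _ _ _ ihs j (by omega)]; omega)]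
      unfold P3
      rw [if_neg (by omega), if_neg (by omega),
          if_pos ⟨by omega, by omega, by omega, by omega, Or.inr ⟨rfl, le_rfl⟩⟩]
      conv_rhs => rw [Ffun]
      rw [if_neg (by omega : ¬ j = 0), if_neg (by omega : ¬ i + 1 = 0)]
      simp only [Nat.add_sub_cancel]
    · rw [nGet_nSet_ne _ _ _ _ _ _ (by omega), ihv]
      unfold P3
      split_ifs <;> first | rfl | omega

theorem A_phase3 (m n : Nat) (depth : Int) (c : List (List Int))
    (hs : shape2 c (n + 1) (m + 1))
    (hc : ∀ y x, nGet c y x = P3 depth m n 0 0 y x) :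
    ∀ j, j ≤ n →
      (shape2 (((List.range j).map (fun t : Nat => (1 : Int) + (t : Int))).foldl
          (fun c y => ((List.range m).map (fun t : Nat => (1 : Int) + (t : Int))).foldl
            (fun c x => pvSet2 c y x
              ((pvGet2 c y (x - 1) * pvGet2 c (y - 1) x + depth) % 20183)) c) c)
        (n + 1) (m + 1)) ∧
      (∀ y x, nGet (((List.range j).map (fun t : Nat => (1 : Int) + (t : Int))).foldl
          (fun c y => ((List.range m).map (fun t : Nat => (1 : Int) + (t : Int))).foldl
            (fun c x => pvSet2 c y x
              ((pvGet2 c y (x - 1) * pvGet2 c (y - 1) x + depth) % 20183)) c) c) y x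
        = P3 depth m n j m y x) := by
  intro j
  induction j with
  | zero =>
    intro _
    simp only [List.range_zero, List.map_nil, List.foldl_nil]
    refine ⟨hs, ?_⟩
    intro y x
    rw [hc]
    unfold P3
    split_ifs <;> first | rfl | omega
  | succ j ih =>
    intro hj
    obtain ⟨ihs, ihv⟩ := ih (by omega)
    simp only [List.range_succ, List.map_append, List.foldl_append,
      List.map_cons, List.map_nil, List.foldl_cons, List.foldl_nil]
    rw [show (1 : Int) + (j : Int) = ((j + 1 : Nat) : Int) by push_cast; ring]
    have ihv' : ∀ y x, nGet (((List.range j).map (fun t : Nat => (1 : Int) + (t : Int))).foldl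
        (fun c y => ((List.range m).map (fun t : Nat => (1 : Int) + (t : Int))).foldl
          (fun c x => pvSet2 c y x
            ((pvGet2 c y (x - 1) * pvGet2 c (y - 1) x + depth) % 20183)) c) c) y x
        = P3 depth m n (j + 1) 0 y x := by
      intro y x
      rw [ihv]
      unfold P3
      split_ifs <;> first | rfl | omega
    exact A_phase3_row m n depth (j + 1) (by omega) (by omega) _ ihs ihv' m le_rfl

theorem nGet_eq_getElem (g : List (List Int)) (y x : Nat) (hy : y < g.length)
    (hx : x < (g[y]'hy).length) : nGet g y x = (g[y]'hy)[x]'hx := by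
  unfold nGet
  rw [List.getD_eq_getElem _ _ hy, List.getD_eq_getElem _ _ hx]

theorem A_final (m n : Nat) (depth : Int) (C3 : List (List Int))
    (hs3 : shape2 C3 (n + 1) (m + 1))
    (hv3 : ∀ y x, nGet C3 y x = P3 depth m n n m y x) :
    (nSet (nSet C3 0 0 (depth % 20183)) n m (depth % 20183)).map
      (fun row => row.map (fun region => region % 3)) = Grid m n depth := by
  have hs4 := shape2_nSet _ _ _ hs3 0 0 (depth % 20183)
  have hs5 := shape2_nSet _ _ _ hs4 n m (depth % 20183)
  have hv5 : ∀ y x, y ≤ n → x ≤ m →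
      nGet (nSet (nSet C3 0 0 (depth % 20183)) n m (depth % 20183)) y x
        = Efun m n depth x y := by
    intro y x hyn hxm
    by_cases hc1 : y = n ∧ x = m
    · rw [hc1.1, hc1.2,
          nGet_nSet_self _ _ _ _ (by rw [hs4.1]; omega)
            (by rw [shape2_row _ _ _ hs4 n (by omega)]; omega)]
      rw [Efun, if_pos (Or.inr ⟨rfl, rfl⟩)]
      norm_num
    · rw [nGet_nSet_ne _ _ _ _ _ _ (by omega)]
      by_cases hc0 : y = 0 ∧ x = 0
      · rw [hc0.1, hc0.2,
            nGet_nSet_self _ _ _ _ (by rw [hs3.1]; omega)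
              (by rw [shape2_row _ _ _ hs3 0 (by omega)]; omega)]
        rw [Efun, if_pos (Or.inl ⟨rfl, rfl⟩)]
        norm_num
      · rw [nGet_nSet_ne _ _ _ _ _ _ (by omega), hv3,
            Efun_eq_Ffun m n depth x y hxm hyn (by tauto) (by tauto)]
        unfold P3
        split_ifs with h1 h2 h3
        · rw [h1.1]
        · rw [h2.1]
        · rfl
        · omega
  refine List.ext_getElem ?_ ?_
  · rw [List.length_map, hs5.1]
    simp [Grid]
  · intro y hy1 hy2
    have hyn : y < n + 1 := by
      rw [List.length_map, hs5.1] at hy1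
      exact hy1
    rw [List.getElem_map]
    have hrowlen : ((nSet (nSet C3 0 0 (depth % 20183)) n m (depth % 20183))[y]'(by rw [hs5.1]; omega)).length = m + 1 :=
      hs5.2 _ (List.getElem_mem _)
    refine List.ext_getElem ?_ ?_
    · rw [List.length_map, hrowlen]
      simp [Grid, rowlist]
    · intro x hx1 hx2
      have hxm : x < m + 1 := by
        rw [List.length_map, hrowlen] at hx1
        exact hx1
      rw [List.getElem_map]
      have hval := hv5 y x (by omega) (by omega)
      rw [nGet_eq_getElem _ _ _ (by rw [hs5.1]; omega) (by rw [hrowlen]; omega)] at hval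
      rw [hval]
      simp [Grid, rowlist]

theorem A_char (m n : Nat) (depth : Int) :
    prepare_cave ((m : Int), (n : Int)) depth = Grid m n depth := by
  unfold prepare_cave
  simp only []
  have hr1 : PySem.List.pyRange 1 ((m : Int) + 1) 1
      = (List.range m).map (fun i : Nat => (1 : Int) + (i : Int)) := by
    rw [PySem.List.pyRange_one]
    norm_num
  have hr2 : PySem.List.pyRange 1 ((n : Int) + 1) 1
      = (List.range n).map (fun i : Nat => (1 : Int) + (i : Int)) := by
    rw [PySem.List.pyRange_one]
    norm_num
  have hcave0 : (PySem.List.pyRange 0 ((n : Int) + 1) 1).map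
      (fun _ => List.replicate ((m : Int) + 1).toNat (0 : Int)) = cave0 m n := by
    rw [show ((m : Int) + 1).toNat = m + 1 by omega, List.map_const',
        PySem.List.length_pyRange_one,
        show (((n : Int) + 1) - 0).toNat = n + 1 by omega]
    rfl
  rw [hcave0, hr1, hr2]
  obtain ⟨hs1, hv1⟩ := A_phase1 m n depth m le_rfl
  obtain ⟨hs2, hv2⟩ := A_phase2 m n depth _ hs1 hv1 n le_rfl
  have hv2' : ∀ y x, nGet (((List.range n).map (fun i : Nat => (1 : Int) + (i : Int))).foldl
      (fun c y => pvSet2 c y 0 ((y * 48271 + depth) % 20183))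
      (((List.range m).map (fun i : Nat => (1 : Int) + (i : Int))).foldl
        (fun c x => pvSet2 c 0 x ((x * 16807 + depth) % 20183)) (cave0 m n))) y x
      = P3 depth m n 0 0 y x := by
    intro y x
    rw [hv2]
    unfold P3
    split_ifs <;> first | rfl | omega
  obtain ⟨hs3, hv3⟩ := A_phase3 m n depth _ hs2 hv2' n le_rfl
  rw [pvSet2_cast _ n m, pvSet2_cast_00]
  exact A_final m n depth _ hs3 hv3

-- ---------- B side ----------

-- every filled entry of a cached row holds the final erosion level of its cell
def RowValid (m n : Nat) (depth : Int) (y : Nat) (row : List (Option Int)) : Prop :=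
  ∀ x v, row.getD x none = some v → v = Efun m n depth x y

def ValidCache (m n : Nat) (depth : Int) (c : PySem.Dict Nat (List (Option Int))) : Prop :=
  ∀ p ∈ c.items, RowValid m n depth p.1 p.2

theorem RowValid_replicate (m n : Nat) (depth : Int) (y : Nat) (k : Nat) :
    RowValid m n depth y (List.replicate k (none : Option Int)) := by
  intro x v h
  rw [getD_replicate'] at h
  split_ifs at h

theorem RowValid_set (m n : Nat) (depth : Int) (y : Nat) (row : List (Option Int))
    (hr : RowValid m n depth y row) (x : Nat) (e : Int) (he : e = Efun m n depth x y) :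
    RowValid m n depth y (row.set x (some e)) := by
  intro x' v h
  by_cases hxx : x = x'
  · subst hxx
    by_cases hlen : x < row.length
    · rw [getD_set_eq _ _ _ _ hlen] at h
      cases h
      exact he
    · rw [List.set_eq_of_length_le (by omega)] at h
      exact hr x v h
  · rw [getD_set_ne _ _ _ _ _ hxx] at h
    exact hr x' v h

theorem ValidCache_get (m n : Nat) (depth : Int) (c : PySem.Dict Nat (List (Option Int)))
    (hv : ValidCache m n depth c) (y : Nat) (r : List (Option Int))
    (h : c.get? y = some r) : RowValid m n depth y r :=
  hv (y, r) (PySem.Dict.mem_items_of_get?_eq_some c h)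

theorem ValidCache_insert (m n : Nat) (depth : Int) (c : PySem.Dict Nat (List (Option Int)))
    (hv : ValidCache m n depth c) (y : Nat) (row : List (Option Int))
    (hrow : RowValid m n depth y row) :
    ValidCache m n depth (c.insert y row) := by
  intro p hp
  rcases (PySem.Dict.mem_items_insert _ _ _ _).mp hp with h | h
  · rw [h]
    exact hrow
  · exact hv p h.1

theorem ValidCache_erase (m n : Nat) (depth : Int) (c : PySem.Dict Nat (List (Option Int)))
    (hv : ValidCache m n depth c) (k : Nat) :
    ValidCache m n depth (c.erase k) := by
  intro p hp
  simp only [PySem.Dict.erase] at hp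
  exact hv p (List.mem_of_mem_filter hp)

-- the row fetched (or freshly created) at the start of erosion, and the cache after that step
theorem pvErosion_fetch (m n : Nat) (depth : Int)
    (c : PySem.Dict Nat (List (Option Int))) (hv : ValidCache m n depth c) (y : Nat) :
    RowValid m n depth y
      (match c.get? y with
       | some r => ((r, c) : List (Option Int) × PySem.Dict Nat (List (Option Int)))
       | none => (List.replicate ((m : Int) + 1).toNat (none : Option Int),
           c.insert y (List.replicate ((m : Int) + 1).toNat (none : Option Int)))).1 ∧
    ValidCache m n depth
      (match c.get? y with
       | some r => ((r, c) : List (Option Int) × PySem.Dict Nat (List (Option Int)))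
       | none => (List.replicate ((m : Int) + 1).toNat (none : Option Int),
           c.insert y (List.replicate ((m : Int) + 1).toNat (none : Option Int)))).2 := by
  cases h : c.get? y with
  | some r => exact ⟨ValidCache_get m n depth c hv y r h, hv⟩
  | none =>
    exact ⟨RowValid_replicate m n depth y _,
      ValidCache_insert m n depth c hv y _ (RowValid_replicate m n depth y _)⟩

theorem pvErosion_step (m n : Nat) (depth : Int) (x y : Nat)
    (IH : ∀ x' y' (c' : PySem.Dict Nat (List (Option Int))), x' + y' < x + y →
      ValidCache m n depth c' →
      (pvErosion (m : Int) (n : Int) depth c' x' y').1 = Efun m n depth x' y' ∧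
      ValidCache m n depth (pvErosion (m : Int) (n : Int) depth c' x' y').2)
    (c : PySem.Dict Nat (List (Option Int))) (hv : ValidCache m n depth c) :
    (pvErosion (m : Int) (n : Int) depth c x y).1 = Efun m n depth x y ∧
    ValidCache m n depth (pvErosion (m : Int) (n : Int) depth c x y).2 := by
  rw [pvErosion]
  simp only []
  obtain ⟨hrowv, hcv⟩ := pvErosion_fetch m n depth c hv y
  generalize hrc : (match c.get? y with
       | some r => ((r, c) : List (Option Int) × PySem.Dict Nat (List (Option Int)))
       | none => (List.replicate ((m : Int) + 1).toNat (none : Option Int),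
           c.insert y (List.replicate ((m : Int) + 1).toNat (none : Option Int)))) = rc
  rw [hrc] at hrowv hcv
  cases hhit : rc.1.getD x none with
  | some v => exact ⟨hrowv x v hhit, hcv⟩
  | none =>
    simp only []
    have hwrite : ∀ (g : Int) (c2 : PySem.Dict Nat (List (Option Int))),
        ValidCache m n depth c2 → (g + depth) % 20183 = Efun m n depth x y →
        ValidCache m n depth
          (c2.insert y
            (((c2.get? y).getD (List.replicate ((m : Int) + 1).toNat none)).set x
              (some ((g + depth) % 20183)))) := by
      intro g c2 hc2 hval
      refine ValidCache_insert m n depth c2 hc2 y _ (RowValid_set m n depth y _ ?_ x _ hval)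
      cases hg : c2.get? y with
      | some r => simpa [hg] using ValidCache_get m n depth c2 hc2 y r hg
      | none => simpa [hg] using RowValid_replicate m n depth y ((m : Int) + 1).toNat
    by_cases h1 : (x = 0 ∧ y = 0) ∨ ((x : Int) = (m : Int) ∧ (y : Int) = (n : Int))
    · have h1' : (x = 0 ∧ y = 0) ∨ (x = m ∧ y = n) := by
        rcases h1 with h | h
        · exact Or.inl h
        · exact Or.inr ⟨Nat.cast_inj.mp h.1, Nat.cast_inj.mp h.2⟩
      rw [if_pos h1]
      have hval : ((0 : Int) + depth) % 20183 = Efun m n depth x y := by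
        rw [Efun, if_pos h1']
      exact ⟨hval, hwrite 0 rc.2 hcv hval⟩
    · have h1' : ¬ ((x = 0 ∧ y = 0) ∨ (x = m ∧ y = n)) := by
        intro h
        rcases h with h | h
        · exact h1 (Or.inl h)
        · exact h1 (Or.inr ⟨by exact_mod_cast h.1, by exact_mod_cast h.2⟩)
      rw [if_neg h1]
      by_cases hy0 : y = 0
      · rw [dif_pos hy0]
        have hval : ((x : Int) * 16807 + depth) % 20183 = Efun m n depth x y := by
          rw [Efun, if_neg h1', if_pos hy0]
        exact ⟨hval, hwrite _ rc.2 hcv hval⟩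
      · rw [dif_neg hy0]
        by_cases hx0 : x = 0
        · rw [dif_pos hx0]
          have hval : ((y : Int) * 48271 + depth) % 20183 = Efun m n depth x y := by
            rw [Efun, if_neg h1', if_neg hy0, if_pos hx0]
          exact ⟨hval, hwrite _ rc.2 hcv hval⟩
        · rw [dif_neg hx0]
          simp only []
          -- the a-lookup: either a valid cached entry of the fetched row, or a recursive call
          have hac : (match rc.1.getD (x - 1) none with
              | some a => ((a, rc.2) : Int × PySem.Dict Nat (List (Option Int)))
              | none => pvErosion (m : Int) (n : Int) depth rc.2 (x - 1) y).1
                = Efun m n depth (x - 1) y ∧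
              ValidCache m n depth (match rc.1.getD (x - 1) none with
              | some a => ((a, rc.2) : Int × PySem.Dict Nat (List (Option Int)))
              | none => pvErosion (m : Int) (n : Int) depth rc.2 (x - 1) y).2 := by
            cases ha : rc.1.getD (x - 1) none with
            | some a => exact ⟨hrowv (x - 1) a ha, hcv⟩
            | none => exact IH (x - 1) y rc.2 (by omega) hcv
          generalize hacg : (match rc.1.getD (x - 1) none with
              | some a => ((a, rc.2) : Int × PySem.Dict Nat (List (Option Int)))
              | none => pvErosion (m : Int) (n : Int) depth rc.2 (x - 1) y) = ac
          rw [hacg] at hac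
          obtain ⟨ha1, ha2⟩ := hac
          -- the b-lookup: either a valid entry of the row above, or a recursive call
          have hbc : (match (ac.2.get? (y - 1)).bind (fun prev => prev.getD x none) with
              | some b => ((b, ac.2) : Int × PySem.Dict Nat (List (Option Int)))
              | none => pvErosion (m : Int) (n : Int) depth ac.2 x (y - 1)).1
                = Efun m n depth x (y - 1) ∧
              ValidCache m n depth (match (ac.2.get? (y - 1)).bind (fun prev => prev.getD x none) with
              | some b => ((b, ac.2) : Int × PySem.Dict Nat (List (Option Int)))
              | none => pvErosion (m : Int) (n : Int) depth ac.2 x (y - 1)).2 := by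
            cases hb : (ac.2.get? (y - 1)).bind (fun prev => prev.getD x none) with
            | some b =>
              obtain ⟨prev, hprev, hpx⟩ := Option.bind_eq_some_iff.mp hb
              exact ⟨ValidCache_get m n depth ac.2 ha2 (y - 1) prev hprev x b hpx, ha2⟩
            | none => exact IH x (y - 1) ac.2 (by omega) ha2
          generalize hbcg : (match (ac.2.get? (y - 1)).bind (fun prev => prev.getD x none) with
              | some b => ((b, ac.2) : Int × PySem.Dict Nat (List (Option Int)))
              | none => pvErosion (m : Int) (n : Int) depth ac.2 x (y - 1)) = bc
          rw [hbcg] at hbc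
          obtain ⟨hb1, hb2⟩ := hbc
          rw [ha1, hb1]
          have hval : (Efun m n depth (x - 1) y * Efun m n depth x (y - 1) + depth) % 20183
              = Efun m n depth x y := by
            conv_rhs => rw [Efun]
            rw [if_neg h1', if_neg hy0, if_neg hx0]
          exact ⟨hval, hwrite _ bc.2 hb2 hval⟩

theorem pvErosion_correct (m n : Nat) (depth : Int) :
    ∀ N x y (c : PySem.Dict Nat (List (Option Int))), x + y ≤ N → ValidCache m n depth c →
      (pvErosion (m : Int) (n : Int) depth c x y).1 = Efun m n depth x y ∧
      ValidCache m n depth (pvErosion (m : Int) (n : Int) depth c x y).2 := by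
  intro N
  induction N with
  | zero =>
    intro x y c h hv
    exact pvErosion_step m n depth x y (fun x' y' c' hlt _ => by omega) c hv
  | succ N ih =>
    intro x y c h hv
    exact pvErosion_step m n depth x y
      (fun x' y' c' hlt hv' => ih x' y' c' (by omega) hv') c hv

theorem B_row (m n : Nat) (depth : Int) (y : Nat) :
    ∀ k, ∀ c0 : PySem.Dict Nat (List (Option Int)), ValidCache m n depth c0 →
      (((List.range k).map (fun i : Nat => (i : Int))).foldl
        (fun (rc : List Int × PySem.Dict Nat (List (Option Int))) x =>
          (rc.1 ++ [(pvErosion (m : Int) (n : Int) depth rc.2 x.toNat y).1 % 3],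
           (pvErosion (m : Int) (n : Int) depth rc.2 x.toNat y).2)) ([], c0)).1
        = (List.range k).map (fun x => Efun m n depth x y % 3) ∧
      ValidCache m n depth
        (((List.range k).map (fun i : Nat => (i : Int))).foldl
          (fun (rc : List Int × PySem.Dict Nat (List (Option Int))) x =>
            (rc.1 ++ [(pvErosion (m : Int) (n : Int) depth rc.2 x.toNat y).1 % 3],
             (pvErosion (m : Int) (n : Int) depth rc.2 x.toNat y).2)) ([], c0)).2 := by
  intro k
  induction k with
  | zero =>
    intro c0 hc0
    simpa using hc0
  | succ k ih =>
    intro c0 hc0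
    obtain ⟨ih1, ih2⟩ := ih c0 hc0
    simp only [List.range_succ, List.map_append, List.foldl_append, List.map_cons,
      List.map_nil, List.foldl_cons, List.foldl_nil, Int.toNat_natCast]
    obtain ⟨he1, he2⟩ := pvErosion_correct m n depth (k + y) k y _ le_rfl ih2
    exact ⟨by rw [ih1, he1], he2⟩

theorem B_inner_eq (m n : Nat) (depth : Int) (y : Nat) (c0 : PySem.Dict Nat (List (Option Int))) :
    (PySem.List.pyRange 0 ((m : Int) + 1) 1).foldl
      (fun (rc : List Int × PySem.Dict Nat (List (Option Int))) x =>
        (rc.1 ++ [(pvErosion (m : Int) (n : Int) depth rc.2 x.toNat y).1 % 3],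
         (pvErosion (m : Int) (n : Int) depth rc.2 x.toNat y).2)) ([], c0)
    = ((List.range (m + 1)).map (fun i : Nat => (i : Int))).foldl
      (fun (rc : List Int × PySem.Dict Nat (List (Option Int))) x =>
        (rc.1 ++ [(pvErosion (m : Int) (n : Int) depth rc.2 x.toNat y).1 % 3],
         (pvErosion (m : Int) (n : Int) depth rc.2 x.toNat y).2)) ([], c0) := by
  have h := PySem.List.pyRange_zero_natCast (m + 1)
  rw [Nat.cast_add, Nat.cast_one] at h
  rw [h]

theorem B_outer (m n : Nat) (depth : Int) :
    ∀ j, ∀ c0 : PySem.Dict Nat (List (Option Int)), ValidCache m n depth c0 →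
      (((List.range j).map (fun i : Nat => (i : Int))).foldl
        (fun (st : List (List Int) × PySem.Dict Nat (List (Option Int))) y =>
          (st.1 ++ [((PySem.List.pyRange 0 ((m : Int) + 1) 1).foldl
            (fun (rc : List Int × PySem.Dict Nat (List (Option Int))) x =>
              (rc.1 ++ [(pvErosion (m : Int) (n : Int) depth rc.2 x.toNat y.toNat).1 % 3],
               (pvErosion (m : Int) (n : Int) depth rc.2 x.toNat y.toNat).2)) ([], st.2)).1],
           if 0 < y then
             ((PySem.List.pyRange 0 ((m : Int) + 1) 1).foldl
               (fun (rc : List Int × PySem.Dict Nat (List (Option Int))) x =>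
                 (rc.1 ++ [(pvErosion (m : Int) (n : Int) depth rc.2 x.toNat y.toNat).1 % 3],
                  (pvErosion (m : Int) (n : Int) depth rc.2 x.toNat y.toNat).2)) ([], st.2)).2.erase
               (y - 1).toNat
           else
             ((PySem.List.pyRange 0 ((m : Int) + 1) 1).foldl
               (fun (rc : List Int × PySem.Dict Nat (List (Option Int))) x =>
                 (rc.1 ++ [(pvErosion (m : Int) (n : Int) depth rc.2 x.toNat y.toNat).1 % 3],
                  (pvErosion (m : Int) (n : Int) depth rc.2 x.toNat y.toNat).2)) ([], st.2)).2))
        ([], c0)).1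
        = (List.range j).map (fun y => (rowlist m n depth y).map (fun e => e % 3)) ∧
      ValidCache m n depth
        (((List.range j).map (fun i : Nat => (i : Int))).foldl
          (fun (st : List (List Int) × PySem.Dict Nat (List (Option Int))) y =>
            (st.1 ++ [((PySem.List.pyRange 0 ((m : Int) + 1) 1).foldl
              (fun (rc : List Int × PySem.Dict Nat (List (Option Int))) x =>
                (rc.1 ++ [(pvErosion (m : Int) (n : Int) depth rc.2 x.toNat y.toNat).1 % 3],
                 (pvErosion (m : Int) (n : Int) depth rc.2 x.toNat y.toNat).2)) ([], st.2)).1],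
             if 0 < y then
               ((PySem.List.pyRange 0 ((m : Int) + 1) 1).foldl
                 (fun (rc : List Int × PySem.Dict Nat (List (Option Int))) x =>
                   (rc.1 ++ [(pvErosion (m : Int) (n : Int) depth rc.2 x.toNat y.toNat).1 % 3],
                    (pvErosion (m : Int) (n : Int) depth rc.2 x.toNat y.toNat).2)) ([], st.2)).2.erase
                 (y - 1).toNat
             else
               ((PySem.List.pyRange 0 ((m : Int) + 1) 1).foldl
                 (fun (rc : List Int × PySem.Dict Nat (List (Option Int))) x =>
                   (rc.1 ++ [(pvErosion (m : Int) (n : Int) depth rc.2 x.toNat y.toNat).1 % 3],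
                    (pvErosion (m : Int) (n : Int) depth rc.2 x.toNat y.toNat).2)) ([], st.2)).2))
          ([], c0)).2 := by
  intro j
  induction j with
  | zero =>
    intro c0 hc0
    simpa using hc0
  | succ j ih =>
    intro c0 hc0
    obtain ⟨ih1, ih2⟩ := ih c0 hc0
    simp only [List.range_succ, List.map_append, List.foldl_append, List.map_cons,
      List.map_nil, List.foldl_cons, List.foldl_nil, Int.toNat_natCast]
    rw [B_inner_eq]
    obtain ⟨hr1, hr2⟩ := B_row m n depth j (m + 1) _ ih2
    refine ⟨?_, ?_⟩
    · rw [ih1, hr1]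
      simp [rowlist, List.map_map, Function.comp_def]
    · split_ifs with h
      · exact ValidCache_erase m n depth _ hr2 _
      · exact hr2

theorem B_char (m n : Nat) (depth : Int) :
    prepare_cave_alt ((m : Int), (n : Int)) depth = Grid m n depth := by
  have hrange : PySem.List.pyRange 0 ((n : Int) + 1) 1
      = (List.range (n + 1)).map (fun i : Nat => (i : Int)) := by
    have h := PySem.List.pyRange_zero_natCast (n + 1)
    rw [Nat.cast_add, Nat.cast_one] at h
    exact h
  have hempty : ValidCache m n depth PySem.Dict.empty := by
    intro p hp
    simp [PySem.Dict.empty] at hp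
  unfold prepare_cave_alt
  simp only []
  rw [hrange]
  exact (B_outer m n depth (n + 1) PySem.Dict.empty hempty).1

-- ===== VERDICT (by name: the statement is the Claim_ definition above) =====
theorem prepare_cave_spec : Claim_equal_prepare_cave := by
  intro target depth _ hpre
  obtain ⟨hx, hy⟩ := hpre
  unfold Spec_prepare_cave
  obtain ⟨tx, ty⟩ := target
  lift tx to Nat using hx
  lift ty to Nat using hy
  rw [A_char, B_char]
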